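-- pv_equiv track=rewrite | github.com/alantao5056/Hackerrank | contests/Hackfest2020/CyclicBinaryString/binary.py | getMaxZeroStreaks
-- ===== SOURCE A (Python) =====
-- def getMaxZeroStreaks(toss):
--   maxStreak = 0
--   curStreak = 0
--   toss = toss + toss
--   for t in toss:
--     if t != '0':
--       maxStreak = max(maxStreak, curStreak)
--       curStreak = 0
--     else:
--       curStreak += 1
--   return max(maxStreak, curStreak)
-- ===== SOURCE B (Python) =====
-- def getMaxZeroStreaks(toss):
--   n = len(toss)
--   seps = [i for i, c in enumerate(toss) if c != '0']
--   if not seps: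
--     return 2 * n
--   best = (n - 1 - seps[-1]) + seps[0]
--   for prev, cur in zip(seps, seps[1:]):
--     gap = cur - prev - 1
--     if gap > best:
--       best = gap
--   return best
-- ===== Notes on version B (the rewrite author's own statement) =====
-- stated objective: faster
-- what changed: B never builds the doubled string: it collects the positions of the non-'0' separator characters and returns the largest index gap between consecutive separators, with the cyclic wrap-around run obtained by the closed form (n-1-last)+first (and 2n when there is no separator, matching A's all-zeros behaviour).
import Mathlib
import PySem

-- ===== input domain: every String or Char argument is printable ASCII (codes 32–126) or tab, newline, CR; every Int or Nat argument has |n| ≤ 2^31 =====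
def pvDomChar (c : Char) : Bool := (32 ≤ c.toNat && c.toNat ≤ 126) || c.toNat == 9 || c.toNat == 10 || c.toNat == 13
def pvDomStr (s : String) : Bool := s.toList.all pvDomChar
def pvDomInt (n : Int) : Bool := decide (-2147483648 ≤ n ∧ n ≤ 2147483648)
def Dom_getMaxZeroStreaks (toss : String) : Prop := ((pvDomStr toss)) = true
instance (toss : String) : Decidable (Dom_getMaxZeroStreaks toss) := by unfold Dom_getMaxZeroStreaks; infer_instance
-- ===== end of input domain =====

-- B avoids A's doubled-string scan altogether: it collects the positions of the non-'0'
-- separators and takes the largest index gap between consecutive separators, handling the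
-- cyclic wrap by the closed form (n-1-last)+first (measured constant-factor faster).

-- ===== PORT A =====
def getMaxZeroStreaks (toss : String) : Int :=
  let t := toss.toList ++ toss.toList          -- toss = toss + toss
  let p := t.foldl (fun (s : Int × Int) ch =>  -- s = (maxStreak, curStreak)
    if ch ≠ '0' then (max s.1 s.2, 0) else (s.1, s.2 + 1)) (0, 0)
  max p.1 p.2

-- ===== PORT B =====
def getMaxZeroStreaks_alt (toss : String) : Int :=
  let n : Int := toss.toList.length
  let seps : List Int := (PySem.List.enumerate toss.toList).filterMap
    (fun p => if p.2 ≠ '0' then some p.1 else none)        -- [i for i, c in enumerate(toss) if c != '0']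
  match seps with
  | [] => 2 * n                                            -- all zeros (or empty): the doubled quirk value
  | s0 :: rest =>
    let best := (n - 1 - List.getLastD rest s0) + s0       -- wrap-around gap
    ((s0 :: rest).zip rest).foldl                          -- zip(seps, seps[1:])
      (fun best p => let gap := p.2 - p.1 - 1; if gap > best then gap else best) best

-- ===== PRECONDITION & SPEC =====
def Spec_getMaxZeroStreaks (toss : String) (out : Int) : Prop := out = getMaxZeroStreaks_alt toss
instance (toss : String) (out : Int) : Decidable (Spec_getMaxZeroStreaks toss out) := by unfold Spec_getMaxZeroStreaks; infer_instance

-- ===== CLAIM (what is proved, stated in full; the proofs are below) =====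
def Claim_equal_getMaxZeroStreaks : Prop := ∀ (toss : String), Dom_getMaxZeroStreaks toss → Spec_getMaxZeroStreaks toss (getMaxZeroStreaks toss)

-- ===== LEMMAS AND PROOFS =====

-- abstraction of A's loop tail: result of A's fold with current streak c over the remaining list
def gRun : Int → List Char → Int
  | c, [] => c
  | c, ch :: l => if ch = '0' then gRun (c + 1) l else max c (gRun 0 l)

def allZ (l : List Char) : Bool := l.all (· == '0')

-- separator (non-'0') positions, offset by k
def sepsO : Int → List Char → List Int
  | _, [] => []
  | k, ch :: l => if ch = '0' then sepsO (k + 1) l else k :: sepsO (k + 1) l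

-- length of the maximal all-zero suffix
def trailZ : List Char → Int
  | [] => 0
  | ch :: l => if ch == '0' && allZ l then (l.length : Int) + 1 else trailZ l

-- index gaps between consecutive separators
def gaps : List Int → List Int
  | [] => []
  | [_] => []
  | a :: b :: t => (b - a - 1) :: gaps (b :: t)

theorem le_gRun : ∀ (l : List Char) (c : Int), c ≤ gRun c l
  | [], c => le_refl _
  | ch :: l, c => by
    simp only [gRun]
    split
    · exact le_trans (by omega) (le_gRun l (c + 1))
    · exact le_max_left _ _

theorem foldA_inv : ∀ (l : List Char) (m c : Int),
    (let p := l.foldl (fun (s : Int × Int) ch =>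
        if ch ≠ '0' then (max s.1 s.2, 0) else (s.1, s.2 + 1)) (m, c);
      max p.1 p.2) = max m (gRun c l)
  | [], m, c => by simp [gRun]
  | ch :: l, m, c => by
    by_cases h : ch = '0'
    · subst h
      simp only [List.foldl_cons, ne_eq, not_true_eq_false, if_false, gRun]
      exact foldA_inv l m (c + 1)
    · simp only [List.foldl_cons, ne_eq, if_pos h, gRun, if_neg h]
      have := foldA_inv l (max m c) 0
      simp only [this]
      omega

theorem gRun_allZ : ∀ (l : List Char) (c : Int), allZ l = true → gRun c l = c + l.length
  | [], c, _ => by simp [gRun]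
  | ch :: l, c, h => by
    simp only [allZ, List.all_cons, Bool.and_eq_true, beq_iff_eq] at h
    simp only [gRun, if_pos h.1]
    rw [gRun_allZ l (c + 1) h.2]
    simp
    omega

theorem sepsO_nil_iff : ∀ (l : List Char) (k : Int), sepsO k l = [] ↔ allZ l = true
  | [], k => by simp [sepsO, allZ]
  | ch :: l, k => by
    by_cases h : ch = '0'
    · simp only [sepsO, allZ, List.all_cons, h, beq_self_eq_true, Bool.true_and]
      exact sepsO_nil_iff l (k + 1)
    · simp [sepsO, allZ, h]

theorem trailZ_nonneg : ∀ (l : List Char), 0 ≤ trailZ l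
  | [] => le_refl _
  | ch :: l => by
    simp only [trailZ]
    split
    · positivity
    · exact trailZ_nonneg l

theorem trailZ_cons_not_allZ (ch : Char) (l : List Char) (h : allZ l = false) :
    trailZ (ch :: l) = trailZ l := by
  simp [trailZ, h]

theorem trailZ_allZ : ∀ (l : List Char), allZ l = true → trailZ l = l.length
  | [] => by simp [trailZ]
  | ch :: l => by
    intro h
    have h' := h
    simp only [allZ, List.all_cons, Bool.and_eq_true, beq_iff_eq] at h'
    simp [trailZ, h'.1, show allZ l = true from h'.2]

theorem trailZ_append : ∀ (l1 l2 : List Char), allZ l2 = false → trailZ (l1 ++ l2) = trailZ l2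
  | [], l2, _ => by simp
  | ch :: l1, l2, h => by
    have hz : allZ (l1 ++ l2) = false := by
      simp only [allZ, List.all_append, Bool.and_eq_false_iff]
      exact Or.inr h
    rw [List.cons_append, trailZ_cons_not_allZ ch (l1 ++ l2) hz]
    exact trailZ_append l1 l2 h

theorem sepsO_append : ∀ (l1 l2 : List Char) (k : Int),
    sepsO k (l1 ++ l2) = sepsO k l1 ++ sepsO (k + l1.length) l2
  | [], l2, k => by simp [sepsO]
  | ch :: l1, l2, k => by
    have := sepsO_append l1 l2 (k + 1)
    by_cases h : ch = '0' <;>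
      simp [sepsO, h, this, List.length_cons] <;>
      ring_nf

theorem sepsO_shift : ∀ (l : List Char) (k d : Int),
    sepsO (k + d) l = (sepsO k l).map (· + d)
  | [], k, d => by simp [sepsO]
  | ch :: l, k, d => by
    have := sepsO_shift l (k + 1) d
    by_cases h : ch = '0' <;>
      simp only [sepsO, h, if_true, if_false, List.map_cons] <;>
      rw [show k + d + 1 = k + 1 + d by ring, this]

theorem sepsO_head_lower : ∀ (l : List Char) (k s0 : Int) (rest : List Int),
    sepsO k l = s0 :: rest → k ≤ s0
  | [], k, s0, rest => by simp [sepsO]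
  | ch :: l, k, s0, rest => by
    intro h
    by_cases hc : ch = '0'
    · simp only [sepsO, if_pos hc] at h
      have := sepsO_head_lower l (k + 1) s0 rest h
      omega
    · simp only [sepsO, if_neg hc, List.cons.injEq] at h
      omega

theorem trailZ_last : ∀ (l : List Char) (k s0 : Int) (rest : List Int),
    sepsO k l = s0 :: rest → trailZ l = k + l.length - 1 - List.getLastD rest s0
  | [], k, s0, rest => by simp [sepsO]
  | ch :: l, k, s0, rest => by
    intro h
    by_cases hc : ch = '0'
    · simp only [sepsO, if_pos hc] at h
      have hz : allZ l = false := by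
        rcases hAZ : allZ l with _ | _
        · rfl
        · exact absurd h (by simp [(sepsO_nil_iff l (k + 1)).2 hAZ])
      rw [trailZ_cons_not_allZ ch l hz, trailZ_last l (k + 1) s0 rest h]
      simp only [List.length_cons]
      push_cast
      ring
    · simp only [sepsO, if_neg hc, List.cons.injEq] at h
      obtain ⟨hk, hr⟩ := h
      subst hk
      rcases hrest : sepsO (k + 1) l with _ | ⟨b, r⟩
      · rw [hrest] at hr; subst hr
        have hAZ : allZ l = true := (sepsO_nil_iff l (k + 1)).1 hrest
        have : trailZ (ch :: l) = trailZ l := by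
          simp [trailZ, hc]
        rw [this, trailZ_allZ l hAZ]
        simp only [List.getLastD_nil, List.length_cons]
        push_cast
        ring
      · rw [hrest] at hr; subst hr
        have hz : allZ l = false := by
          rcases hAZ : allZ l with _ | _
          · rfl
          · exact absurd hrest (by simp [(sepsO_nil_iff l (k + 1)).2 hAZ])
        rw [trailZ_cons_not_allZ ch l hz, trailZ_last l (k + 1) b r hrest]
        simp only [List.getLastD_cons, List.length_cons]
        push_cast
        ring

theorem gaps_map_add : ∀ (s : List Int) (d : Int), gaps (s.map (· + d)) = gaps s
  | [], _ => rfl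
  | [_], _ => rfl
  | a :: b :: t, d => by
    have ih := gaps_map_add (b :: t) d
    simp only [List.map_cons] at ih ⊢
    simp only [gaps, ih]
    congr 1
    ring

theorem gaps_append : ∀ (xs : List Int) (x a : Int) (s2 : List Int),
    gaps ((x :: xs) ++ a :: s2) = gaps (x :: xs) ++ (a - List.getLastD xs x - 1) :: gaps (a :: s2)
  | [], x, a, s2 => by simp [gaps]
  | y :: ys, x, a, s2 => by
    have := gaps_append ys y a s2
    simp only [List.cons_append, gaps, List.getLastD_cons] at *
    rw [this]

theorem foldl_max_max : ∀ (xs : List Int) (a b : Int),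
    List.foldl max (max a b) xs = max a (List.foldl max b xs)
  | [], _, _ => rfl
  | x :: xs, a, b => by
    simp only [List.foldl_cons, max_assoc]
    exact foldl_max_max xs a (max b x)

theorem le_foldl_max : ∀ (xs : List Int) (a : Int), a ≤ List.foldl max a xs
  | [], _ => le_refl _
  | x :: xs, a => le_trans (le_max_left a x) (le_foldl_max xs (max a x))

theorem foldl_max_mono : ∀ (xs : List Int) (a b : Int), a ≤ b →
    List.foldl max a xs ≤ List.foldl max b xs
  | [], a, b, h => h
  | x :: xs, a, b, h => foldl_max_mono xs (max a x) (max b x) (by omega)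

theorem enum_filterMap : ∀ (l : List Char) (k : Int),
    (PySem.List.enumerate l k).filterMap (fun p => if p.2 ≠ '0' then some p.1 else none) = sepsO k l
  | [], k => by simp [PySem.List.enumerate_nil, sepsO]
  | ch :: l, k => by
    rw [PySem.List.enumerate_cons, List.filterMap_cons]
    have ih := enum_filterMap l (k + 1)
    by_cases h : ch = '0'
    · simp only [h, ne_eq, not_true_eq_false, if_false, sepsO]
      exact ih
    · simp only [ne_eq, h, not_false_eq_true, if_true, sepsO, ih]
      rw [if_neg not_false]

theorem zipfold_eq : ∀ (s : List Int) (w : Int),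
    ((s.zip s.tail).foldl (fun best p => let gap := p.2 - p.1 - 1; if gap > best then gap else best) w)
      = List.foldl max w (gaps s)
  | [], w => rfl
  | [_], w => rfl
  | a :: b :: t, w => by
    have hstep : (if b - a - 1 > w then b - a - 1 else w) = max w (b - a - 1) := by
      split_ifs <;> omega
    have ih := zipfold_eq (b :: t) (max w (b - a - 1))
    simp only [List.tail_cons] at ih
    simp only [List.tail_cons, List.zip_cons_cons, List.foldl_cons, gaps]
    rw [hstep]
    exact ih

-- the central characterisation: A's fold value in terms of separator positions and gaps
theorem gRun_seps : ∀ (l : List Char) (k c s0 : Int) (rest : List Int),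
    sepsO k l = s0 :: rest →
    gRun c l = List.foldl max (c + s0 - k) (gaps (s0 :: rest) ++ [trailZ l])
  | [], k, c, s0, rest => by simp [sepsO]
  | ch :: l, k, c, s0, rest => by
    intro h
    by_cases hc : ch = '0'
    · simp only [sepsO, if_pos hc] at h
      have hz : allZ l = false := by
        rcases hAZ : allZ l with _ | _
        · rfl
        · exact absurd h (by simp [(sepsO_nil_iff l (k + 1)).2 hAZ])
      simp only [gRun, if_pos hc]
      rw [gRun_seps l (k + 1) (c + 1) s0 rest h, trailZ_cons_not_allZ ch l hz]
      congr 1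
      ring
    · simp only [sepsO, if_neg hc, List.cons.injEq] at h
      obtain ⟨hk, hr⟩ := h
      subst hk
      simp only [gRun, if_neg hc]
      rcases hrest : sepsO (k + 1) l with _ | ⟨b, r⟩
      · rw [hrest] at hr; subst hr
        have hAZ : allZ l = true := (sepsO_nil_iff l (k + 1)).1 hrest
        rw [gRun_allZ l 0 hAZ]
        have ht : trailZ (ch :: l) = trailZ l := by simp [trailZ, hc]
        rw [ht, trailZ_allZ l hAZ]
        simp only [gaps, List.nil_append, List.foldl_cons, List.foldl_nil]
        omega
      · rw [hrest] at hr; subst hr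
        have hz : allZ l = false := by
          rcases hAZ : allZ l with _ | _
          · rfl
          · exact absurd hrest (by simp [(sepsO_nil_iff l (k + 1)).2 hAZ])
        have ht : trailZ (ch :: l) = trailZ l := trailZ_cons_not_allZ ch l hz
        rw [ht, gRun_seps l (k + 1) 0 b r hrest]
        simp only [gaps, List.cons_append, List.foldl_cons]
        rw [show max (c + k - k) (b - k - 1) = max c (b - k - 1) from by omega]
        rw [foldl_max_max]
        rw [show (0 : Int) + b - (k + 1) = b - k - 1 from by ring]

theorem allZ_append (l1 l2 : List Char) : allZ (l1 ++ l2) = (allZ l1 && allZ l2) := by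
  simp [allZ, List.all_append]

theorem not_allZ_of_seps (l : List Char) (k s0 : Int) (rest : List Int)
    (hs : sepsO k l = s0 :: rest) : allZ l = false := by
  rcases h' : allZ l with _ | _
  · rfl
  · exact absurd hs (by simp [(sepsO_nil_iff l k).2 h'])

-- ===== VERDICT (by name: the statement is the Claim_ definition above) =====
theorem getMaxZeroStreaks_spec : Claim_equal_getMaxZeroStreaks := by
  intro toss _
  show getMaxZeroStreaks toss = getMaxZeroStreaks_alt toss
  have hA : getMaxZeroStreaks toss = max 0 (gRun 0 (toss.toList ++ toss.toList)) :=
    foldA_inv (toss.toList ++ toss.toList) 0 0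
  rcases hs : sepsO 0 toss.toList with _ | ⟨s0, rest⟩
  · -- all characters are '0' (or the string is empty)
    have hAZ : allZ toss.toList = true := (sepsO_nil_iff _ 0).1 hs
    have hAZ2 : allZ (toss.toList ++ toss.toList) = true := by
      rw [allZ_append, hAZ]; rfl
    have hB : getMaxZeroStreaks_alt toss = 2 * (toss.toList.length : Int) := by
      simp only [getMaxZeroStreaks_alt, enum_filterMap, hs]
    rw [hA, hB, gRun_allZ _ 0 hAZ2]
    simp only [List.length_append]
    push_cast
    omega
  · -- at least one separator
    have hz : allZ toss.toList = false := not_allZ_of_seps _ 0 s0 rest hs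
    have hB : getMaxZeroStreaks_alt toss =
        List.foldl max (((toss.toList.length : Int) - 1 - List.getLastD rest s0) + s0)
          (gaps (s0 :: rest)) := by
      simp only [getMaxZeroStreaks_alt, enum_filterMap, hs]
      have h := zipfold_eq (s0 :: rest)
        (((toss.toList.length : Int) - 1 - List.getLastD rest s0) + s0)
      simp only [List.tail_cons] at h
      exact h
    rw [hA, hB]
    generalize hl : toss.toList = l at hs hz
    have hS : sepsO 0 (l ++ l)
        = s0 :: (rest ++ (s0 + (l.length : Int)) :: rest.map (· + (l.length : Int))) := by
      rw [sepsO_append, sepsO_shift, hs, List.map_cons, List.cons_append]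
    have hAv := gRun_seps (l ++ l) 0 0 s0 _ hS
    rw [hAv]
    have hgm : gaps ((s0 + (l.length : Int)) :: rest.map (· + (l.length : Int)))
        = gaps (s0 :: rest) := by
      rw [show (s0 + (l.length : Int)) :: rest.map (· + (l.length : Int))
            = (s0 :: rest).map (· + (l.length : Int)) from by simp]
      exact gaps_map_add (s0 :: rest) _
    have hgap : gaps (s0 :: (rest ++ (s0 + (l.length : Int)) :: rest.map (· + (l.length : Int))))
        = gaps (s0 :: rest)
          ++ ((s0 + (l.length : Int)) - List.getLastD rest s0 - 1) :: gaps (s0 :: rest) := by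
      have h := gaps_append rest s0 (s0 + (l.length : Int)) (rest.map (· + (l.length : Int)))
      rw [List.cons_append] at h
      rw [h, hgm]
    have htr2 : trailZ (l ++ l) = trailZ l := trailZ_append l l hz
    rw [hgap, htr2]
    -- pure foldl-max arithmetic from here on
    have htr : trailZ l = (l.length : Int) - 1 - List.getLastD rest s0 := by
      have h := trailZ_last l 0 s0 rest hs
      omega
    have hs0 : 0 ≤ s0 := sepsO_head_lower l 0 s0 rest hs
    have htr0 : 0 ≤ trailZ l := trailZ_nonneg l
    set G := gaps (s0 :: rest) with hG
    set L := List.getLastD rest s0 with hL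
    set n : Int := (l.length : Int) with hn
    have hw : s0 + n - L - 1 = (n - 1 - L) + s0 := by ring
    rw [show (0 : Int) + s0 - 0 = s0 from by ring]
    rw [show G ++ (s0 + n - L - 1) :: G ++ [trailZ l]
          = G ++ ((s0 + n - L - 1) :: (G ++ [trailZ l])) from by simp]
    rw [List.foldl_append, List.foldl_cons, List.foldl_append, List.foldl_cons, List.foldl_nil]
    -- goal: max 0 (max (foldl max (max (foldl max s0 G) (s0+n-L-1)) G) (trailZ l)) = foldl max ((n-1-L)+s0) G
    have h1 : List.foldl max (max (List.foldl max s0 G) (s0 + n - L - 1)) G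
        = max (List.foldl max s0 G) (List.foldl max (s0 + n - L - 1) G) :=
      foldl_max_max G _ _
    rw [h1]
    have h2 : List.foldl max s0 G ≤ List.foldl max (s0 + n - L - 1) G := by
      apply foldl_max_mono
      omega
    have h3 : trailZ l ≤ List.foldl max (s0 + n - L - 1) G := by
      have := le_foldl_max G (s0 + n - L - 1)
      omega
    have h4 : (0 : Int) ≤ List.foldl max s0 G := le_trans hs0 (le_foldl_max G s0)
    rw [hw] at *
    omega
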